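-- pv_equiv track=rewrite | github.com/pypi-data/pypi-mirror-385 | packages/ncbi-tree/ncbi_tree-1.0.0.tar.gz/ncbi_tree-1.0.0/ncbi_tree/core.py | generate_newick_tree_simple
-- ===== SOURCE A (Python) =====
-- from typing import Dict, List, Tuple
--
-- def generate_newick_tree_simple(taxonomy_id: str, tree: Dict[str, List[str]]) -> str:
-- 	"""Generate Newick format tree with only NCBI taxa IDs"""
-- 	children = sorted(tree.get(taxonomy_id, []), key=lambda x: int(x) if x.isdigit() else 0)
-- 	if not children:
-- 		return taxonomy_id
-- 	child_strings = []
-- 	for child in children: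
-- 		child_strings.append(generate_newick_tree_simple(child, tree))
-- 	return f"({','.join(child_strings)}){taxonomy_id}"
-- ===== SOURCE B (Python) =====
-- def generate_newick_tree_simple(taxonomy_id: str, tree) -> str:
--     """Generate Newick format tree with only NCBI taxa IDs.
--
--     Emits tokens into one flat accumulator during a single post-order walk and
--     joins once at the end, instead of building and joining a string per node."""
--     out = []
--
--     def emit(node):
--         children = sorted(tree.get(node, []), key=lambda x: int(x) if x.isdigit() else 0)
--         if not children:
--             out.append(node)
--             return
--         out.append("(")
--         first = True
--         for child in children:
--             if first:
--                 first = False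
--             else:
--                 out.append(",")
--             emit(child)
--         out.append(")")
--         out.append(node)
--
--     emit(taxonomy_id)
--     return "".join(out)
-- ===== Notes on version B (the rewrite author's own statement) =====
-- stated objective: alternative
-- what changed: A builds a Newick string per node and joins child strings at every internal node; B does one post-order walk that emits tokens into a single flat accumulator and joins once at the end, avoiding all per-node string assembly.
import Mathlib
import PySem

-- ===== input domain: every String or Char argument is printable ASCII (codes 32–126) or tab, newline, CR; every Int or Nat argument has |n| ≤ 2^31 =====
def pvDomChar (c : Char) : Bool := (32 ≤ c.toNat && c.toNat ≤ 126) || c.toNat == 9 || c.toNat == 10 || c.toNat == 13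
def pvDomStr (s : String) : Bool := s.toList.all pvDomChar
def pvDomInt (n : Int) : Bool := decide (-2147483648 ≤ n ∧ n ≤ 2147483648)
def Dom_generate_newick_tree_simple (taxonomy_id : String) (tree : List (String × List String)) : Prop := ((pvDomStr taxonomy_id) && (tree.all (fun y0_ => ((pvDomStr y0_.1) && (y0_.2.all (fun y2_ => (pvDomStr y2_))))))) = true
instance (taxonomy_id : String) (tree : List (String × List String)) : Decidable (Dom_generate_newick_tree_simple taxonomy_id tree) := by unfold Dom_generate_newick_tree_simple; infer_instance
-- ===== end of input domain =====

-- B replaces A's per-node string building and joining by one flat token accumulator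
-- filled during a single post-order walk and joined once at the end (return value only;
-- both are recursive, both Pythons raise RecursionError on cyclic/over-deep input —
-- cyclic inputs are excluded by Pre_). Both Lean ports are fuel-bounded (fuel = |tree|+1,
-- a totality guard only; under Pre_ the recursion depth never exhausts it).

-- shared helper: the child list of `node`, exactly
-- `sorted(tree.get(node, []), key=lambda x: int(x) if x.isdigit() else 0)`
-- (the identical line occurs in both Pythons)
def pvKey (x : String) : Int := if PySem.Str.strIsdigit x then (PySem.Int.ofStr? x).getD 0 else 0

def pvChildren (tree : List (String × List String)) (node : String) : List String :=
  PySem.List.sorted ((PySem.Dict.mk tree).getD node []) pvKey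

-- ===== PORT A =====
def pvAgo (tree : List (String × List String)) : Nat → String → String
  | 0, _ => ""   -- fuel exhausted (unreachable under Pre_)
  | fuel + 1, taxonomy_id =>
    let children := pvChildren tree taxonomy_id
    if children = [] then taxonomy_id
    else
      let child_strings := children.foldl (fun acc child => acc ++ [pvAgo tree fuel child]) []
      "(" ++ PySem.Str.join "," child_strings ++ ")" ++ taxonomy_id

def generate_newick_tree_simple (taxonomy_id : String) (tree : List (String × List String)) : String :=
  pvAgo tree (tree.length + 1) taxonomy_id

-- ===== PORT B =====
-- `emit`: appends the tokens of `node`'s fragment to the accumulator `out`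
def pvBemit (tree : List (String × List String)) : Nat → String → List String → List String
  | 0, _, out => out   -- fuel exhausted (unreachable under Pre_)
  | fuel + 1, node, out =>
    let children := pvChildren tree node
    if children = [] then out ++ [node]
    else
      let st := children.foldl
        (fun (st : List String × Bool) child =>
          let o := if st.2 then st.1 else st.1 ++ [","]
          (pvBemit tree fuel child o, false))
        (out ++ ["("], true)
      st.1 ++ [")"] ++ [node]

def generate_newick_tree_simple_alt (taxonomy_id : String) (tree : List (String × List String)) : String :=
  PySem.Str.join "" (pvBemit tree (tree.length + 1) taxonomy_id [])

-- ===== PRECONDITION & SPEC =====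
-- Pre_ excludes exactly the inputs whose root can reach, through the child relation, a
-- node lying on a cycle (i.e. a node that is in the |tree|-step neighbourhood of its own
-- children; |tree| steps cover every reachable node since shortest paths/cycles have at
-- most |tree| edges): there the Python recursion never bottoms out and A raises
-- RecursionError instead of returning.
def pvSucc (tree : List (String × List String)) (n : String) : List String :=
  (PySem.Dict.mk tree).getD n []

-- one-step neighbourhood expansion of a node set
def pvStep (tree : List (String × List String)) (s : List String) : List String :=
  (s ++ s.flatMap (pvSucc tree)).dedup

def Pre_generate_newick_tree_simple (taxonomy_id : String) (tree : List (String × List String)) : Prop :=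
  ∀ k ∈ (pvStep tree)^[tree.length] [taxonomy_id], k ∉ (pvStep tree)^[tree.length] (pvSucc tree k)

instance (taxonomy_id : String) (tree : List (String × List String)) : Decidable (Pre_generate_newick_tree_simple taxonomy_id tree) := by unfold Pre_generate_newick_tree_simple; infer_instance

def pvWitness_generate_newick_tree_simple : String × (List (String × List String)) :=
  ("1", [("1", ["3", "2"]), ("2", ["4"])])

def Spec_generate_newick_tree_simple (taxonomy_id : String) (tree : List (String × List String)) (out : String) : Prop := out = generate_newick_tree_simple_alt taxonomy_id tree
instance (taxonomy_id : String) (tree : List (String × List String)) (out : String) : Decidable (Spec_generate_newick_tree_simple taxonomy_id tree out) := by unfold Spec_generate_newick_tree_simple; infer_instance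

-- ===== CLAIM (what is proved, stated in full; the proofs are below) =====
def Claim_equal_generate_newick_tree_simple : Prop := ∀ (taxonomy_id : String) (tree : List (String × List String)), Dom_generate_newick_tree_simple taxonomy_id tree → Pre_generate_newick_tree_simple taxonomy_id tree → Spec_generate_newick_tree_simple taxonomy_id tree (generate_newick_tree_simple taxonomy_id tree)

-- ===== LEMMAS AND PROOFS =====
-- "".join as a function, and its computation rules
def pvJoinAll (xs : List String) : String := PySem.Str.join "" xs

theorem pvFlatten_intersperse_nil {α : Type} (l : List (List α)) :
    (List.intersperse [] l).flatten = l.flatten := by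
  induction l with
  | nil => rfl
  | cons a l ih =>
    cases l with
    | nil => rfl
    | cons b t => simp_all [List.intersperse_cons₂]

theorem pvJoinAll_toList (xs : List String) :
    (pvJoinAll xs).toList = (xs.map String.toList).flatten := by
  simp [pvJoinAll, PySem.Str.toList_join, PySem.Chars.join, List.intercalate,
        pvFlatten_intersperse_nil]

theorem pvJoinAll_append (xs ys : List String) :
    pvJoinAll (xs ++ ys) = pvJoinAll xs ++ pvJoinAll ys := by
  rw [← String.toList_inj]
  simp [pvJoinAll_toList, String.toList_append]

theorem pvJoinAll_singleton (x : String) : pvJoinAll [x] = x := by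
  rw [← String.toList_inj]; simp [pvJoinAll_toList]

theorem pvJoinAll_cons (x : String) (xs : List String) :
    pvJoinAll (x :: xs) = x ++ pvJoinAll xs := by
  rw [← String.toList_inj]; simp [pvJoinAll_toList, String.toList_append]

theorem pvJoinAll_nil : pvJoinAll [] = "" := by
  rw [← String.toList_inj]; simp [pvJoinAll_toList]

theorem pvJoinC_cons_cons (x y : String) (rest : List String) :
    PySem.Str.join "," (x :: y :: rest) = x ++ "," ++ PySem.Str.join "," (y :: rest) := by
  rw [← String.toList_inj]
  simp [PySem.Str.toList_join, PySem.Chars.join_cons_cons, String.toList_append]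

theorem pvJoinC_singleton (x : String) : PySem.Str.join "," [x] = x := by
  rw [← String.toList_inj]
  simp [PySem.Str.toList_join, PySem.Chars.join_singleton]

-- ",".join(x :: xs) = x ++ "".join(map ("," ++ .) xs)
theorem pvJoin_comma_cons (x : String) (xs : List String) :
    PySem.Str.join "," (x :: xs) = x ++ pvJoinAll (xs.map (fun s => "," ++ s)) := by
  induction xs generalizing x with
  | nil => simp [pvJoinC_singleton, pvJoinAll_nil, String.append_empty]
  | cons y ys ih =>
    rw [pvJoinC_cons_cons, ih, List.map_cons, pvJoinAll_cons, String.append_assoc,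
        String.append_assoc]

-- main invariant: emitting into `out` appends exactly A's string for the node
theorem pvB_eq_A (tree : List (String × List String)) :
    ∀ (fuel : Nat) (node : String) (out : List String),
      pvJoinAll (pvBemit tree fuel node out) = pvJoinAll out ++ pvAgo tree fuel node := by
  intro fuel
  induction fuel with
  | zero => intro node out; simp [pvBemit, pvAgo, String.append_empty]
  | succ f ih =>
    intro node out
    by_cases h : pvChildren tree node = []
    · simp [pvBemit, pvAgo, h, pvJoinAll_append, pvJoinAll_singleton]
    · obtain ⟨c0, cs, hc⟩ : ∃ c0 cs, pvChildren tree node = c0 :: cs := by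
        cases hcc : pvChildren tree node with
        | nil => exact absurd hcc h
        | cons a b => exact ⟨a, b, rfl⟩
      -- inner fold lemma, for this f
      have inner : ∀ (ds : List String) (st : List String),
          pvJoinAll ((ds.foldl
            (fun (st : List String × Bool) child =>
              (pvBemit tree f child (if st.2 then st.1 else st.1 ++ [","]), false))
            (st, false)).1)
          = pvJoinAll st ++ pvJoinAll ((ds.map (pvAgo tree f)).map (fun s => "," ++ s)) := by
        intro ds
        induction ds with
        | nil => intro st; simp [pvJoinAll_nil, String.append_empty]
        | cons d ds ihd =>
          intro st
          simp only [List.foldl_cons, List.map_cons, Bool.false_eq_true, if_false]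
          rw [ihd, ih, pvJoinAll_append, pvJoinAll_singleton, pvJoinAll_cons]
          simp [String.append_assoc]
      rw [pvAgo, pvBemit]
      simp only [hc, reduceCtorEq, if_false, List.foldl_cons, reduceIte,
        PySem.List.foldl_append_singleton_eq_map, List.nil_append, List.singleton_append]
      rw [pvJoin_comma_cons, pvJoinAll_append, pvJoinAll_append,
          inner cs (pvBemit tree f c0 (out ++ ["("])), ih,
          pvJoinAll_append, pvJoinAll_singleton]
      simp [pvJoinAll_singleton, String.append_assoc]

-- ===== VERDICT (by name: the statement is the Claim_ definition above) =====
theorem generate_newick_tree_simple_spec : Claim_equal_generate_newick_tree_simple := by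
  intro taxonomy_id tree _ _
  show generate_newick_tree_simple taxonomy_id tree = generate_newick_tree_simple_alt taxonomy_id tree
  unfold generate_newick_tree_simple generate_newick_tree_simple_alt
  rw [show PySem.Str.join "" (pvBemit tree (tree.length + 1) taxonomy_id []) =
        pvJoinAll (pvBemit tree (tree.length + 1) taxonomy_id []) from rfl,
      pvB_eq_A, pvJoinAll_nil, String.empty_append]
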